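-- pv_equiv track=rewrite | github.com/mission1215/AutoStock | functions/main.py | _merge_ai_universe_kr
-- ===== SOURCE A (Python) =====
-- MAX_AI_UNIVERSE_STOCKS = 20   # 시세 수집 호출 수 ∝ 이 값
--
-- GEMINI_UNIVERSE_KR = [
--     "005930", "000660", "035420", "051910", "006400", "035720", "000270", "068270",
--     "207940", "005380", "012330", "066570", "105560", "055550", "086790", "003550",
--     "034730", "096770", "017670", "015760", "028260", "032830", "009150", "033780",
--     "018260", "011200", "024110", "316140", "042700", "086520", "247540", "352820",
--     "373220", "323410", "000810", "302440", "090430", "006260", "001040", "000100",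
--     "034220", "009540", "010130", "000720", "005490", "267250", "036570", "052400",
--     "196170", "003670", "010950", "036460",
-- ]
--
-- def _merge_ai_universe_kr(cfg: dict) -> list[str]:
--     """감시목록 우선 + 대표 풀, 중복 제거, API 부담 상한까지."""
--     seen: set[str] = set()
--     out: list[str] = []
--     for raw in list(cfg.get("kr_watchlist", [])) + GEMINI_UNIVERSE_KR:
--         s = str(raw).strip()
--         if not s.isdigit():
--             continue
--         c = s.zfill(6)
--         if c in seen:
--             continue
--         seen.add(c)
--         out.append(c)
--         if len(out) >= MAX_AI_UNIVERSE_STOCKS: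
--             break
--     return out
-- ===== SOURCE B (Python) =====
-- MAX_AI_UNIVERSE_STOCKS = 20
--
-- GEMINI_UNIVERSE_KR = [
--     "005930", "000660", "035420", "051910", "006400", "035720", "000270", "068270",
--     "207940", "005380", "012330", "066570", "105560", "055550", "086790", "003550",
--     "034730", "096770", "017670", "015760", "028260", "032830", "009150", "033780",
--     "018260", "011200", "024110", "316140", "042700", "086520", "247540", "352820",
--     "373220", "323410", "000810", "302440", "090430", "006260", "001040", "000100",
--     "034220", "009540", "010130", "000720", "005490", "267250", "036570", "052400",
--     "196170", "003670", "010950", "036460",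
-- ]
--
-- def _merge_ai_universe_kr(cfg: dict) -> list[str]:
--     """Normalize once; recover the first-seen order by sorting the distinct codes
--     by their first-occurrence position, then cap."""
--     codes = [s.zfill(6)
--              for s in (str(x).strip() for x in list(cfg.get("kr_watchlist", [])) + GEMINI_UNIVERSE_KR)
--              if s.isdigit()]
--     return sorted(set(codes), key=codes.index)[:MAX_AI_UNIVERSE_STOCKS]
-- ===== Notes on version B (the rewrite author's own statement) =====
-- stated objective: alternative
-- what changed: Replaces A's fused streaming loop (mutable seen-set, accumulator, early break) by a sort-based algorithm: normalize all candidates, take the distinct codes as an unordered set, and SORT them by first-occurrence position (sorted(set(codes), key=codes.index)) before capping; order is reconstructed by sorting instead of being preserved by a single pass.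
import Mathlib
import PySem

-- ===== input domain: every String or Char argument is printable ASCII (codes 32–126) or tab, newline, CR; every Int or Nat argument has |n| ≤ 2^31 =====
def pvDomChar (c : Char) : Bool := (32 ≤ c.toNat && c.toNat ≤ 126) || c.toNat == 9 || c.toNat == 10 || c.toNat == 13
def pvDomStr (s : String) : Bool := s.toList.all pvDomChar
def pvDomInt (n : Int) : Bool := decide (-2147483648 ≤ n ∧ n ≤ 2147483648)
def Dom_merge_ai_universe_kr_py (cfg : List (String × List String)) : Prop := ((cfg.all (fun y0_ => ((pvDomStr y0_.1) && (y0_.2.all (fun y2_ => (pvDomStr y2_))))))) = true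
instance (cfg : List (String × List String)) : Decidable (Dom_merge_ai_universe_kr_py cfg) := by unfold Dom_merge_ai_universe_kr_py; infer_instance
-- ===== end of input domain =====

-- B replaces A's fused streaming loop (seen-set + accumulator + early break) by a sort-based
-- algorithm: normalize everything, take the distinct codes, sort them by first-occurrence
-- position, then cap (objective: alternative; same output, not faster).

def pvGeminiUniverseKR : List String := [
  "005930", "000660", "035420", "051910", "006400", "035720", "000270", "068270",
  "207940", "005380", "012330", "066570", "105560", "055550", "086790", "003550",
  "034730", "096770", "017670", "015760", "028260", "032830", "009150", "033780",
  "018260", "011200", "024110", "316140", "042700", "086520", "247540", "352820",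
  "373220", "323410", "000810", "302440", "090430", "006260", "001040", "000100",
  "034220", "009540", "010130", "000720", "005490", "267250", "036570", "052400",
  "196170", "003670", "010950", "036460"]

-- ===== PORT A =====
-- A's for-loop with `seen` set, `out` accumulator and the `break` at MAX (= 20);
-- `str(raw)` on a string is the identity and is omitted.
def pvALoop (xs : List String) (seen : PySem.Set String) (out : List String) : List String :=
  match xs with
  | [] => out
  | raw :: rest =>
    let s := PySem.Str.strip raw
    if ¬ PySem.Str.strIsdigit s then pvALoop rest seen out
    else
      let c := PySem.Str.zfill s 6
      if seen.contains c then pvALoop rest seen out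
      else
        let seen' := seen.add c
        let out' := out ++ [c]
        if 20 ≤ out'.length then out' else pvALoop rest seen' out'

def merge_ai_universe_kr_py (cfg : List (String × List String)) : List String :=
  pvALoop (PySem.Dict.getD ⟨cfg⟩ "kr_watchlist" [] ++ pvGeminiUniverseKR) PySem.Set.empty []

-- ===== PORT B =====
-- `str(x).strip()` then keep `s.zfill(6)` if `s.isdigit()` (Source B's normalize comprehension)
def pvNormB (raw : String) : Option String :=
  let s := PySem.Str.strip raw
  if PySem.Str.strIsdigit s then some (PySem.Str.zfill s 6) else none

-- sorted(set(codes), key=codes.index)[:20].  The key `codes.index` is injective on set(codes)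
-- (distinct first-occurrence positions), so sorting the PySem.Set is exact regardless of
-- Python's hash iteration order; every element of set(codes) is in codes, so `.index` never
-- raises and the `.getD 0` default is never used.
def merge_ai_universe_kr_py_alt (cfg : List (String × List String)) : List String :=
  let codes := (PySem.Dict.getD ⟨cfg⟩ "kr_watchlist" [] ++ pvGeminiUniverseKR).filterMap pvNormB
  (PySem.List.sorted (PySem.Set.ofList codes)
      (fun c => (PySem.List.index? codes c).getD 0) false).take 20

-- ===== PRECONDITION & SPEC =====
def Spec_merge_ai_universe_kr_py (cfg : List (String × List String)) (out : List String) : Prop := out = merge_ai_universe_kr_py_alt cfg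
instance (cfg : List (String × List String)) (out : List String) : Decidable (Spec_merge_ai_universe_kr_py cfg out) := by unfold Spec_merge_ai_universe_kr_py; infer_instance

-- ===== CLAIM (what is proved, stated in full; the proofs are below) =====
def Claim_equal_merge_ai_universe_kr_py : Prop := ∀ (cfg : List (String × List String)), Dom_merge_ai_universe_kr_py cfg → Spec_merge_ai_universe_kr_py cfg (merge_ai_universe_kr_py cfg)

-- ===== LEMMAS AND PROOFS =====

-- dedup of the not-yet-seen suffix, relative to a running `seen` set (proof device)
def pvSeenDedup (seen : PySem.Set String) (ys : List String) : List String :=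
  match ys with
  | [] => []
  | c :: ys => if seen.contains c then pvSeenDedup seen ys
               else c :: pvSeenDedup (seen.add c) ys

theorem pvALoop_eq (xs : List String) (seen : PySem.Set String) (out : List String)
    (hlen : out.length < 20) :
    pvALoop xs seen out = out ++ (pvSeenDedup seen (xs.filterMap pvNormB)).take (20 - out.length) := by
  induction xs generalizing seen out with
  | nil => simp [pvALoop, pvSeenDedup]
  | cons raw rest ih =>
    rw [List.filterMap_cons]
    by_cases hd : PySem.Str.strIsdigit (PySem.Str.strip raw) = true
    · have hn : pvNormB raw = some (PySem.Str.zfill (PySem.Str.strip raw) 6) := by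
        simp only [pvNormB, if_pos hd]
      rw [hn]
      show (if ¬ PySem.Str.strIsdigit (PySem.Str.strip raw) = true then pvALoop rest seen out
            else _) = _
      rw [if_neg (not_not_intro hd)]
      by_cases hc : seen.contains (PySem.Str.zfill (PySem.Str.strip raw) 6) = true
      · rw [if_pos hc, pvSeenDedup, if_pos hc, ih _ _ hlen]
      · rw [if_neg hc, pvSeenDedup, if_neg hc]
        have hl : (out ++ [PySem.Str.zfill (PySem.Str.strip raw) 6]).length = out.length + 1 := by
          simp
        by_cases h20 : 20 ≤ out.length + 1
        · rw [if_pos (by omega : 20 ≤ (out ++ [PySem.Str.zfill (PySem.Str.strip raw) 6]).length)]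
          have h19 : out.length = 19 := by omega
          simp [h19]
        · rw [if_neg (by omega : ¬ 20 ≤ (out ++ [PySem.Str.zfill (PySem.Str.strip raw) 6]).length),
              ih _ _ (by omega)]
          have h1 : 20 - out.length = (20 - (out.length + 1)) + 1 := by omega
          simp [h1, hl]
    · have hn : pvNormB raw = none := by simp only [pvNormB, if_neg hd]
      rw [hn]
      show (if ¬ PySem.Str.strIsdigit (PySem.Str.strip raw) = true then pvALoop rest seen out
            else _) = _
      rw [if_pos hd, ih _ _ hlen]

theorem pvOfList_eq_seenDedup (ys : List String) (pre : List String) :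
    PySem.Set.ofList (pre ++ ys) = PySem.Set.ofList pre ++ pvSeenDedup (PySem.Set.ofList pre) ys := by
  induction ys generalizing pre with
  | nil => simp [pvSeenDedup]
  | cons c ys ih =>
    rw [pvSeenDedup]
    have hsplit : pre ++ c :: ys = (pre ++ [c]) ++ ys := by simp
    have hof : PySem.Set.ofList (pre ++ [c]) = PySem.Set.add (PySem.Set.ofList pre) c := by
      simp [PySem.Set.ofList_eq_foldl, List.foldl_append]
    by_cases hc : (PySem.Set.ofList pre).contains c = true
    · have ha : PySem.Set.add (PySem.Set.ofList pre) c = PySem.Set.ofList pre := by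
        simp only [PySem.Set.add, if_pos hc]
      rw [if_pos hc, hsplit, ih (pre ++ [c]), hof, ha]
    · have ha : PySem.Set.add (PySem.Set.ofList pre) c = PySem.Set.ofList pre ++ [c] := by
        simp only [PySem.Set.add, if_neg hc]
      rw [if_neg hc, hsplit, ih (pre ++ [c]), hof, ha]
      simp

-- first-occurrence index of c in `full`, as Source B's sort key computes it
def pvIdx (full : List String) (c : String) : Nat := (PySem.List.index? full c).getD 0

-- elements of the running dedup of the suffix `ys` have strictly increasing first-occurrence
-- indices in the full list `pre ++ ys`, all ≥ pre.length
theorem pvSeenDedup_idx (ys pre : List String) :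
    (∀ c ∈ pvSeenDedup (PySem.Set.ofList pre) ys, pre.length ≤ pvIdx (pre ++ ys) c) ∧
    List.Pairwise (fun a b => pvIdx (pre ++ ys) a < pvIdx (pre ++ ys) b)
      (pvSeenDedup (PySem.Set.ofList pre) ys) := by
  induction ys generalizing pre with
  | nil => simp [pvSeenDedup]
  | cons c ys ih =>
    have hsplit : pre ++ c :: ys = (pre ++ [c]) ++ ys := by simp
    have hof : PySem.Set.ofList (pre ++ [c]) = PySem.Set.add (PySem.Set.ofList pre) c := by
      simp [PySem.Set.ofList_eq_foldl, List.foldl_append]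
    rw [pvSeenDedup]
    by_cases hc : (PySem.Set.ofList pre).contains c = true
    · have ha : PySem.Set.add (PySem.Set.ofList pre) c = PySem.Set.ofList pre := by
        simp only [PySem.Set.add, if_pos hc]
      rw [if_pos hc, hsplit]
      have := ih (pre ++ [c])
      rw [hof, ha] at this
      refine ⟨fun d hd => ?_, this.2⟩
      have := this.1 d hd
      simp only [List.length_append, List.length_cons, List.length_nil] at this
      omega
    · have ha : PySem.Set.add (PySem.Set.ofList pre) c = PySem.Set.ofList pre ++ [c] := by
        simp only [PySem.Set.add, if_neg hc]
      rw [if_neg hc, hsplit]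
      have hmem : c ∉ pre := by
        intro hm
        apply hc
        have : c ∈ PySem.Set.ofList pre := (PySem.Set.mem_ofList _ _).mpr hm
        exact List.elem_eq_true_of_mem this
      have hidx : PySem.List.index? ((pre ++ [c]) ++ ys) c = some pre.length := by
        have : (pre ++ [c]) ++ ys = pre ++ c :: ys := by simp
        rw [this]
        exact (PySem.List.index?_eq_some_iff _ _ _).mpr ⟨pre, ys, rfl, rfl, hmem⟩
      have hic : pvIdx ((pre ++ [c]) ++ ys) c = pre.length := by
        simp only [pvIdx, hidx, Option.getD_some]
      have := ih (pre ++ [c])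
      rw [hof] at this
      have hlen1 : (pre ++ [c]).length = pre.length + 1 := by simp
      constructor
      · intro d hd
        rcases List.mem_cons.mp hd with h | h
        · subst h; rw [hic]
        · have := this.1 d h; omega
      · refine List.pairwise_cons.mpr ⟨fun d hd => ?_, this.2⟩
        have := this.1 d hd; rw [hic]; omega

theorem pvSorted_set_eq (codes : List String) :
    PySem.List.sorted (PySem.Set.ofList codes)
        (fun c => (PySem.List.index? codes c).getD 0) false
      = pvSeenDedup PySem.Set.empty codes := by
  have hof : PySem.Set.ofList codes = pvSeenDedup PySem.Set.empty codes := by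
    have := pvOfList_eq_seenDedup codes []
    simpa [PySem.Set.empty] using this
  have hp := (pvSeenDedup_idx codes []).2
  simp only [List.nil_append] at hp
  have hperm : (pvSeenDedup PySem.Set.empty codes).Perm (PySem.Set.ofList codes) := by
    rw [hof]
  have hp' : (pvSeenDedup PySem.Set.empty codes).Pairwise
      (fun a b => (fun c => (PySem.List.index? codes c).getD 0) a
                < (fun c => (PySem.List.index? codes c).getD 0) b) := by
    simpa [pvIdx, PySem.Set.empty] using hp
  exact PySem.List.sorted_eq_of_perm_of_pairwise_lt _ _ _ hperm hp'

-- ===== VERDICT (by name: the statement is the Claim_ definition above) =====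
theorem merge_ai_universe_kr_py_spec : Claim_equal_merge_ai_universe_kr_py := by
  intro cfg _
  unfold Spec_merge_ai_universe_kr_py merge_ai_universe_kr_py merge_ai_universe_kr_py_alt
  rw [pvALoop_eq _ _ _ (by simp)]
  simp only [pvSorted_set_eq]
  simp
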